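-- pv_equiv track=rewrite | github.com/guose1314/tcmautoresearch | src/research/phases/publish_phase.py | _count_unsupported_publish_claims
-- ===== SOURCE A (Python) =====
-- from typing import TYPE_CHECKING, Any, Dict, List
--
-- def _count_unsupported_publish_claims(
--
--     claim_ids: List[str],
--     evidence_claim_traces: List[Dict[str, Any]],
-- ) -> int:
--     if not claim_ids:
--         return 0
--     unsupported = 0
--     trace_ids = [
--         str(item.get("id") or "").strip() for item in evidence_claim_traces
--     ]
--     for claim_id in claim_ids:
--         if not any(
--             trace_id == claim_id or trace_id.endswith(f"::{claim_id}")
--             for trace_id in trace_ids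
--         ):
--             unsupported += 1
--     return unsupported
-- ===== SOURCE B (Python) =====
-- def _count_unsupported_publish_claims(claim_ids, evidence_claim_traces):
--     supported = set()
--     for item in evidence_claim_traces:
--         t = str(item.get("id") or "").strip()
--         supported.add(t)
--         for i in range(len(t) - 1):
--             if t[i:i + 2] == "::":
--                 supported.add(t[i + 2:])
--     return sum(1 for c in claim_ids if c not in supported)
-- ===== Notes on version B (the rewrite author's own statement) =====
-- stated objective: faster
-- what changed: Replaces A's per-claim nested scan over all trace ids (equality or endswith('::'+claim) tests) with a single pass over evidence_claim_traces that builds a 'supported' set of every stripped trace id and all of its post-'::' suffixes, then one membership pass over claim_ids.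
import Mathlib
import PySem

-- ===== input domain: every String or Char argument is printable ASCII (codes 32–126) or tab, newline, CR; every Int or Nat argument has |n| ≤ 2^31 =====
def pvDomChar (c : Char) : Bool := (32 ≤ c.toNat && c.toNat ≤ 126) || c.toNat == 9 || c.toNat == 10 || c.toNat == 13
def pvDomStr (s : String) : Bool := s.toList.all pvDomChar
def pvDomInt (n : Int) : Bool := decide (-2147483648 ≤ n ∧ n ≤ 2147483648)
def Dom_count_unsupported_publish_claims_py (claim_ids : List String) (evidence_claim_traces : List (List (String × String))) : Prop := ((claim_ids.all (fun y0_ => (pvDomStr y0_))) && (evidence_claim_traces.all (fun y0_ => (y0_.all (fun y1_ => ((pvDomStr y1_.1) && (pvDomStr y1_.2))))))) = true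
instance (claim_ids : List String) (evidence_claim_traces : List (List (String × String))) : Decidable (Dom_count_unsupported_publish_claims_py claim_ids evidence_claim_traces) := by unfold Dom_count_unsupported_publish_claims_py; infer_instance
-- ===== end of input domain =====

-- B replaces A's per-claim nested scan over all trace ids by a one-pass "supported" index
-- (each trace id plus all its post-"::" suffixes) followed by a single membership pass (objective: faster).

-- ===== PORT A =====
-- str(item.get("id") or "").strip()  — the 'or ""' collapses None (and '') to "", i.e. getD ""
def pvTraceId (item : List (String × String)) : String :=
  PySem.Str.strip ((PySem.Dict.get? ⟨item⟩ "id").getD "")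

def count_unsupported_publish_claims_py (claim_ids : List String) (evidence_claim_traces : List (List (String × String))) : Int :=
  if claim_ids = [] then 0
  else
    let trace_ids := evidence_claim_traces.map (fun item => pvTraceId item)
    claim_ids.foldl (fun unsupported claim_id =>
      if trace_ids.any (fun trace_id =>
          trace_id == claim_id || PySem.Str.endswith trace_id ("::" ++ claim_id))
      then unsupported
      else unsupported + 1) 0

-- ===== PORT B =====
-- for i in range(len(t) - 1): if t[i:i+2] == "::": supported.add(t[i+2:])
def pvAddSuffixes (s : PySem.Set String) (t : String) : PySem.Set String :=
  (PySem.List.pyRange 0 (PySem.Str.len t - 1)).foldl (fun s i =>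
    if PySem.Str.slice t (some i) (some (i + 2)) == "::"
    then PySem.Set.add s (PySem.Str.slice t (some (i + 2)) none)
    else s) s

def count_unsupported_publish_claims_py_alt (claim_ids : List String) (evidence_claim_traces : List (List (String × String))) : Int :=
  let supported : PySem.Set String :=
    evidence_claim_traces.foldl (fun s item =>
      let t := PySem.Str.strip ((PySem.Dict.get? ⟨item⟩ "id").getD "")
      pvAddSuffixes (PySem.Set.add s t) t) PySem.Set.empty
  -- sum(1 for c in claim_ids if c not in supported)
  (claim_ids.countP (fun c => !(PySem.Set.contains supported c)) : Int)

-- ===== PRECONDITION & SPEC =====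
def Spec_count_unsupported_publish_claims_py (claim_ids : List String) (evidence_claim_traces : List (List (String × String))) (out : Int) : Prop := out = count_unsupported_publish_claims_py_alt claim_ids evidence_claim_traces
instance (claim_ids : List String) (evidence_claim_traces : List (List (String × String))) (out : Int) : Decidable (Spec_count_unsupported_publish_claims_py claim_ids evidence_claim_traces out) := by unfold Spec_count_unsupported_publish_claims_py; infer_instance

-- ===== CLAIM (what is proved, stated in full; the proofs are below) =====
def Claim_equal_count_unsupported_publish_claims_py : Prop := ∀ (claim_ids : List String) (evidence_claim_traces : List (List (String × String))), Dom_count_unsupported_publish_claims_py claim_ids evidence_claim_traces → Spec_count_unsupported_publish_claims_py claim_ids evidence_claim_traces (count_unsupported_publish_claims_py claim_ids evidence_claim_traces)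

-- ===== LEMMAS AND PROOFS =====

-- membership in the inner conditional-add fold of pvAddSuffixes
theorem mem_foldl_add_if {α : Type} [BEq α] [LawfulBEq α] (l : List Int) (p : Int → Bool) (f : Int → α)
    (s : PySem.Set α) (x : α) :
    (x ∈ l.foldl (fun s i => if p i then PySem.Set.add s (f i) else s) s) ↔
      x ∈ s ∨ ∃ i ∈ l, p i = true ∧ x = f i := by
  induction l generalizing s with
  | nil => simp
  | cons a tl ih =>
    simp only [List.foldl_cons]
    cases h : p a with
    | true =>
      rw [if_pos rfl, ih, PySem.Set.mem_add]
      constructor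
      · rintro ((hx | rfl) | ⟨i, hi, hp⟩)
        · exact Or.inl hx
        · exact Or.inr ⟨a, List.mem_cons_self, h, rfl⟩
        · exact Or.inr ⟨i, List.mem_cons_of_mem a hi, hp⟩
      · rintro (hx | ⟨i, hi, hp⟩)
        · exact Or.inl (Or.inl hx)
        · rcases List.mem_cons.mp hi with rfl | hi
          · exact Or.inl (Or.inr hp.2)
          · exact Or.inr ⟨i, hi, hp⟩
    | false =>
      rw [if_neg (by simp), ih]
      constructor
      · rintro (hx | ⟨i, hi, hp⟩)
        · exact Or.inl hx
        · exact Or.inr ⟨i, List.mem_cons_of_mem a hi, hp⟩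
      · rintro (hx | ⟨i, hi, hp⟩)
        · exact Or.inl hx
        · rcases List.mem_cons.mp hi with rfl | hi
          · exact absurd hp.1 (by simp [h])
          · exact Or.inr ⟨i, hi, hp⟩

theorem mem_addSuffixes (s : PySem.Set String) (t x : String) :
    x ∈ pvAddSuffixes s t ↔
      x ∈ s ∨ ∃ i ∈ PySem.List.pyRange 0 (PySem.Str.len t - 1),
        (PySem.Str.slice t (some i) (some (i + 2)) == "::") = true ∧
        x = PySem.Str.slice t (some (i + 2)) none := by
  unfold pvAddSuffixes
  exact mem_foldl_add_if _ _ _ s x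

-- membership in B's "supported" index, over any initial set
theorem mem_supported_fold (l : List (List (String × String))) (s : PySem.Set String) (x : String) :
    (x ∈ l.foldl (fun s item =>
        let t := PySem.Str.strip ((PySem.Dict.get? ⟨item⟩ "id").getD "")
        pvAddSuffixes (PySem.Set.add s t) t) s) ↔
      x ∈ s ∨ ∃ item ∈ l,
        (x = pvTraceId item ∨
         ∃ i ∈ PySem.List.pyRange 0 (PySem.Str.len (pvTraceId item) - 1),
           (PySem.Str.slice (pvTraceId item) (some i) (some (i + 2)) == "::") = true ∧
           x = PySem.Str.slice (pvTraceId item) (some (i + 2)) none) := by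
  induction l generalizing s with
  | nil => simp
  | cons a tl ih =>
    simp only [List.foldl_cons]
    rw [ih, mem_addSuffixes, PySem.Set.mem_add]
    simp only [List.mem_cons, pvTraceId]
    constructor
    · rintro (((h | h) | h) | h)
      · tauto
      · exact Or.inr ⟨a, Or.inl rfl, Or.inl h⟩
      · exact Or.inr ⟨a, Or.inl rfl, Or.inr h⟩
      · obtain ⟨it, hm, hp⟩ := h; exact Or.inr ⟨it, Or.inr hm, hp⟩
    · rintro (h | ⟨it, (rfl | hm), hp⟩)
      · tauto
      · rcases hp with h | h
        · exact Or.inl (Or.inl (Or.inr h))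
        · exact Or.inl (Or.inr h)
      · exact Or.inr ⟨it, hm, hp⟩

-- list-level characterisation of endswith("::" + c): some "::"-window with c as the rest
theorem endswith_sep_iff (t c : List Char) :
    (':' :: ':' :: c <:+ t) ↔
      ∃ n : Nat, n + 1 < t.length ∧ (t.drop n).take 2 = [':', ':'] ∧ c = t.drop (n + 2) := by
  constructor
  · rintro ⟨p, rfl⟩
    refine ⟨p.length, by simp, ?_, ?_⟩
    · rw [List.drop_left]; rfl
    · have h2 : p.length + 2 = (p ++ [':', ':']).length := by simp
      rw [show p ++ ':' :: ':' :: c = (p ++ [':', ':']) ++ c by simp, h2, List.drop_left]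
  · rintro ⟨n, _, htake, rfl⟩
    have h := (List.take_append_drop 2 (t.drop n)).symm
    rw [htake, List.drop_drop] at h
    refine ⟨t.take n, ?_⟩
    conv_rhs => rw [← List.take_append_drop n t]
    rw [h]
    rfl

set_option maxHeartbeats 1000000 in
-- per-claim bridge: claim is in the supported index iff some trace id matches A's predicate
theorem claim_supported_iff (evidence_claim_traces : List (List (String × String))) (c : String) :
    (c ∈ evidence_claim_traces.foldl (fun s item =>
        let t := PySem.Str.strip ((PySem.Dict.get? ⟨item⟩ "id").getD "")
        pvAddSuffixes (PySem.Set.add s t) t) PySem.Set.empty) ↔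
      (evidence_claim_traces.map (fun item => pvTraceId item)).any (fun trace_id =>
        trace_id == c || PySem.Str.endswith trace_id ("::" ++ c)) = true := by
  rw [mem_supported_fold, List.any_eq_true]
  simp only [PySem.Set.empty, List.not_mem_nil, false_or, List.mem_map]
  constructor
  · rintro ⟨item, hm, hp⟩
    refine ⟨pvTraceId item, ⟨item, hm, rfl⟩, ?_⟩
    rcases hp with rfl | ⟨i, hi, hsl, rfl⟩
    · simp
    · -- the "::"-window at i turns into a suffix match
      rw [PySem.List.mem_pyRange_one] at hi
      obtain ⟨n, rfl⟩ := Int.eq_ofNat_of_zero_le hi.1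
      refine Bool.or_eq_true_iff.mpr (Or.inr ?_)
      rw [PySem.Str.endswith_eq, PySem.Chars.endswith_iff, String.toList_append,
        show "::".toList = [':', ':'] from rfl]
      have hsl' := congrArg String.toList (beq_iff_eq.mp hsl)
      rw [PySem.Str.toList_slice, PySem.Chars.slice_eq_listSlice,
        show ((n : Int) + 2) = ((n + 2 : Nat) : Int) by push_cast; ring,
        PySem.List.slice_natCast, show n + 2 - n = 2 by omega,
        show "::".toList = [':', ':'] from rfl] at hsl'
      rw [PySem.Str.toList_slice, PySem.Chars.slice_eq_listSlice,
        PySem.List.slice_from _ (by positivity),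
        show ((n : Int) + 2).toNat = n + 2 by omega]
      apply (endswith_sep_iff _ _).mpr
      have hlen := hi.2
      rw [PySem.Str.len_eq] at hlen
      exact ⟨n, by omega, hsl', rfl⟩
  · rintro ⟨_, ⟨item, hm, rfl⟩, hp⟩
    refine ⟨item, hm, ?_⟩
    rcases Bool.or_eq_true_iff.mp hp with h | h
    · exact Or.inl (beq_iff_eq.mp h).symm
    · rw [PySem.Str.endswith_eq, PySem.Chars.endswith_iff, String.toList_append,
        show "::".toList = [':', ':'] from rfl] at h
      obtain ⟨n, hlt, htake, hc⟩ := (endswith_sep_iff _ _).mp h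
      refine Or.inr ⟨(n : Int), ?_, ?_, ?_⟩
      · rw [PySem.List.mem_pyRange_one, PySem.Str.len_eq]
        constructor <;> [positivity; omega]
      · rw [beq_iff_eq, String.ext_iff, PySem.Str.toList_slice, PySem.Chars.slice_eq_listSlice,
          show ((n : Int) + 2) = ((n + 2 : Nat) : Int) by push_cast; ring,
          PySem.List.slice_natCast, show n + 2 - n = 2 by omega,
          show "::".toList = [':', ':'] from rfl]
        exact htake
      · rw [String.ext_iff, PySem.Str.toList_slice, PySem.Chars.slice_eq_listSlice,
          PySem.List.slice_from _ (by positivity),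
          show ((n : Int) + 2).toNat = n + 2 by omega]
        exact hc

-- A's count-the-misses loop is a countP of the negated test
theorem foldl_miss_count (l : List String) (p : String → Bool) (a : Int) :
    l.foldl (fun acc c => if p c then acc else acc + 1) a = a + (l.countP (fun c => !p c) : Int) := by
  rw [show (fun (acc : Int) c => if p c then acc else acc + 1)
        = (fun acc c => if (!p c) then acc + 1 else acc) from
      funext fun acc => funext fun c => by cases p c <;> simp]
  exact PySem.List.foldl_if_add_one _ l a

-- ===== VERDICT (by name: the statement is the Claim_ definition above) =====
theorem count_unsupported_publish_claims_py_spec : Claim_equal_count_unsupported_publish_claims_py := by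
  intro claim_ids evidence_claim_traces _
  unfold Spec_count_unsupported_publish_claims_py
  unfold count_unsupported_publish_claims_py count_unsupported_publish_claims_py_alt
  by_cases hnil : claim_ids = []
  · simp [hnil]
  · simp only [if_neg hnil]
    rw [foldl_miss_count, zero_add]
    have hmain : claim_ids.countP (fun c =>
        !((evidence_claim_traces.map (fun item => pvTraceId item)).any (fun trace_id =>
          trace_id == c || PySem.Str.endswith trace_id ("::" ++ c))))
      = claim_ids.countP (fun c => !(PySem.Set.contains
          (evidence_claim_traces.foldl (fun s item =>
            let t := PySem.Str.strip ((PySem.Dict.get? ⟨item⟩ "id").getD "")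
            pvAddSuffixes (PySem.Set.add s t) t) PySem.Set.empty) c)) := by
      apply List.countP_congr
      intro c _
      simp only [Bool.not_eq_true', Bool.eq_false_iff, ne_eq,
        PySem.Set.contains_iff, claim_supported_iff]
    exact congrArg (fun n : Nat => (n : Int)) hmain
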